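-- pv_equiv track=rewrite | github.com/Biruk-gebru/A2SVBirukG | A2SV G6 - Round #2 16-Feb-2025/D - Bomb Detection Validation 267486.py | validate_minesweeper_field
-- ===== SOURCE A (Python) =====
-- def in_bounds(x, y, n, m):
--     return 0 <= x < n and 0 <= y < m
--
-- def count_bombs(mine, x, y, n, m):
--     directions = [(-1, -1), (-1, 0), (-1, 1),
--                   (0, -1),          (0, 1),
--                   (1, -1), (1, 0), (1, 1)]
--
--     bomb_count = 0
--     for dx, dy in directions:
--         if in_bounds(x + dx, y + dy, n, m) and mine[x + dx][y + dy] == '*':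
--             bomb_count += 1
--
--     return bomb_count
--
-- def validate_minesweeper_field(n, m, mine):
--     for i in range(n):
--         for j in range(m):
--             if mine[i][j].isdigit():
--                 expected_bombs = int(mine[i][j])
--                 actual_bombs = count_bombs(mine, i, j, n, m)
--                 if expected_bombs != actual_bombs:
--                     return "NO"
--             elif mine[i][j] == '.':
--                 if count_bombs(mine, i, j, n, m) > 0:
--                     return "NO"
--     return "YES"
-- ===== SOURCE B (Python) =====
-- def validate_minesweeper_field(n, m, mine):
--     # Scatter pass: each bomb increments a counter for every cell of its 3x3 block.
--     counts = {}
--     for i in range(n):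
--         for j in range(m):
--             if mine[i][j] == '*':
--                 for x in range(max(0, i - 1), min(n, i + 2)):
--                     for y in range(max(0, j - 1), min(m, j + 2)):
--                         counts[(x, y)] = counts.get((x, y), 0) + 1
--     # Validation pass: digit cells must match their counter, '.' cells must have none.
--     for i in range(n):
--         for j in range(m):
--             c = mine[i][j]
--             if c.isdigit():
--                 if counts.get((i, j), 0) != int(c):
--                     return "NO"
--             elif c == '.':
--                 if counts.get((i, j), 0) != 0:
--                     return "NO"
--     return "YES"
-- ===== Notes on version B (the rewrite author's own statement) =====
-- stated objective: alternative
-- what changed: B replaces A's per-cell gather over an 8-direction offset list (helper functions in_bounds/count_bombs) by a scatter pass: every bomb increments a dict counter for each cell of its clipped 3x3 block, then a second pass validates each digit/'.' cell against its counter.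
-- outside the precondition, e.g. on validate_minesweeper_field(3, 1, ['5', '.']): A returns 'NO', B raises IndexError
import Mathlib
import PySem

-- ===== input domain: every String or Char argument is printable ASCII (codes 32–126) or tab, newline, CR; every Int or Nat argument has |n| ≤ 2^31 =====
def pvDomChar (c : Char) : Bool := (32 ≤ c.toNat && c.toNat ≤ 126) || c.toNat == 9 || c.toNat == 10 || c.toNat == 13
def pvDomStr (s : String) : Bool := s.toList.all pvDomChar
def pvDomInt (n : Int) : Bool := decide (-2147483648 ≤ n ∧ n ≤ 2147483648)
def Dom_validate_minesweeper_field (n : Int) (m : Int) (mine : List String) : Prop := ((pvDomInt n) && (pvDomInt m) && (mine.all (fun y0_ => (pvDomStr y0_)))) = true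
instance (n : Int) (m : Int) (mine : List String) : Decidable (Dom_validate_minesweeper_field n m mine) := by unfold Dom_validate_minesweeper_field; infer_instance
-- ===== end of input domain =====

-- B replaces A's per-cell gather over a directions list by a scatter pass: every bomb
-- increments a dict counter for each cell of its (clipped) 3x3 block, and a second pass
-- validates each digit/'.' cell against its counter (alternative algorithm, same cost class).
-- Equivalence is about the return value only; neither version mutates its arguments.

-- ===== PORT A =====
-- mine[i][j] under the loops' bounds (total form; used by both ports at in-range indices only)
def pvCell (mine : List String) (i j : Int) : Char :=
  PySem.List.pyGetD (PySem.List.pyGetD mine i "").toList j ' '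

-- int(c) for a one-character digit string
def pvIntC (c : Char) : Int := (PySem.Int.ofChars? [c]).getD 0

def pv_in_bounds (x y n m : Int) : Bool := decide (0 ≤ x ∧ x < n) && decide (0 ≤ y ∧ y < m)

def pv_directions : List (Int × Int) :=
  [(-1,-1),(-1,0),(-1,1),(0,-1),(0,1),(1,-1),(1,0),(1,1)]

def count_bombs (mine : List String) (x y n m : Int) : Int :=
  pv_directions.foldl (fun bc d =>
    if pv_in_bounds (x + d.1) (y + d.2) n m && (pvCell mine (x + d.1) (y + d.2) == '*')
    then bc + 1 else bc) 0

def validate_minesweeper_field (n : Int) (m : Int) (mine : List String) : String :=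
  match (PySem.List.pyRange 0 n 1).findSome? (fun i =>
      (PySem.List.pyRange 0 m 1).findSome? (fun j =>
        if PySem.Chars.isdigit (pvCell mine i j) then
          (if pvIntC (pvCell mine i j) ≠ count_bombs mine i j n m then some "NO" else none)
        else if pvCell mine i j == '.' then
          (if count_bombs mine i j n m > 0 then some "NO" else none)
        else none)) with
  | some s => s
  | none => "YES"

-- ===== PORT B =====
-- scatter pass of Source B: counts[(x,y)] = counts.get((x,y),0) + 1 over each bomb's clipped block
def pvScatter (n m : Int) (mine : List String) : PySem.Dict (Int × Int) Int :=
  (PySem.List.pyRange 0 n 1).foldl (fun d i =>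
    (PySem.List.pyRange 0 m 1).foldl (fun d j =>
      if pvCell mine i j == '*' then
        (PySem.List.pyRange (max 0 (i-1)) (min n (i+2)) 1).foldl (fun d x =>
          (PySem.List.pyRange (max 0 (j-1)) (min m (j+2)) 1).foldl (fun d y =>
            d.insert (x, y) (d.getD (x, y) 0 + 1)) d) d
      else d) d) PySem.Dict.empty

def validate_minesweeper_field_alt (n : Int) (m : Int) (mine : List String) : String :=
  let counts := pvScatter n m mine
  match (PySem.List.pyRange 0 n 1).findSome? (fun i =>
      (PySem.List.pyRange 0 m 1).findSome? (fun j =>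
        if PySem.Chars.isdigit (pvCell mine i j) then
          (if counts.getD (i, j) 0 ≠ pvIntC (pvCell mine i j) then some "NO" else none)
        else if pvCell mine i j == '.' then
          (if counts.getD (i, j) 0 ≠ 0 then some "NO" else none)
        else none)) with
  | some s => s
  | none => "YES"

-- ===== PRECONDITION & SPEC =====
-- Pre_ excludes grids too small for the stated dimensions (n rows of length ≥ m must exist):
-- there the Python A raises IndexError, except on a few inputs where it happens to return "NO"
-- from an early complete row before touching the missing part; B raises there as well.
def Pre_validate_minesweeper_field (n : Int) (m : Int) (mine : List String) : Prop :=
  0 < n → 0 < m → ((n ≤ (mine.length : Int)) ∧ ∀ s ∈ mine.take n.toNat, m ≤ (s.toList.length : Int))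
instance (n : Int) (m : Int) (mine : List String) : Decidable (Pre_validate_minesweeper_field n m mine) := by
  unfold Pre_validate_minesweeper_field; infer_instance

def pvWitness_validate_minesweeper_field : Int × Int × List String := (2, 2, ["*1", "11"])

def Spec_validate_minesweeper_field (n : Int) (m : Int) (mine : List String) (out : String) : Prop := out = validate_minesweeper_field_alt n m mine
instance (n : Int) (m : Int) (mine : List String) (out : String) : Decidable (Spec_validate_minesweeper_field n m mine out) := by unfold Spec_validate_minesweeper_field; infer_instance

-- ===== CLAIM (what is proved, stated in full; the proofs are below) =====
def Claim_equal_validate_minesweeper_field : Prop := ∀ (n : Int) (m : Int) (mine : List String), Dom_validate_minesweeper_field n m mine → Pre_validate_minesweeper_field n m mine → Spec_validate_minesweeper_field n m mine (validate_minesweeper_field n m mine)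

-- ===== LEMMAS AND PROOFS =====

-- all grid cells (i, j), 0 ≤ i < n, 0 ≤ j < m, in row-major order
def pvCells (n m : Int) : List (Int × Int) :=
  (PySem.List.pyRange 0 n 1).flatMap (fun i => (PySem.List.pyRange 0 m 1).map (fun j => (i, j)))

-- the clipped 3x3 block a bomb at (i, j) scatters into
def pvBlock (n m i j : Int) : List (Int × Int) :=
  (PySem.List.pyRange (max 0 (i-1)) (min n (i+2)) 1).flatMap (fun x =>
    (PySem.List.pyRange (max 0 (j-1)) (min m (j+2)) 1).map (fun y => (x, y)))

-- the flat list of all scatter targets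
def pvBig (n m : Int) (mine : List String) : List (Int × Int) :=
  (pvCells n m).flatMap (fun p => if pvCell mine p.1 p.2 == '*' then pvBlock n m p.1 p.2 else [])

theorem pv_mem_pairs (xs ys : List Int) (p : Int × Int) :
    p ∈ xs.flatMap (fun x => ys.map (fun y => (x, y))) ↔ p.1 ∈ xs ∧ p.2 ∈ ys := by
  rcases p with ⟨a, b⟩
  simp [List.mem_flatMap]

theorem pv_nodup_pairs (xs ys : List Int) (hx : xs.Nodup) (hy : ys.Nodup) :
    (xs.flatMap (fun x => ys.map (fun y => (x, y)))).Nodup := by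
  rw [List.nodup_flatMap]
  refine ⟨fun x _ => hy.map (fun a b h => by simpa using h), ?_⟩
  refine hx.imp ?_
  intro a b hab p hp hq
  simp at hp hq
  obtain ⟨y, _, rfl⟩ := hp
  obtain ⟨y', _, h⟩ := hq
  exact hab (by simpa using congrArg Prod.fst h.symm)

theorem pv_findSome?_congr {α β : Type} (l : List α) (f g : α → Option β)
    (h : ∀ x ∈ l, f x = g x) : l.findSome? f = l.findSome? g := by
  induction l with
  | nil => rfl
  | cons x t ih =>
    simp only [List.findSome?_cons, h x (by simp)]
    cases g x with
    | some v => rfl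
    | none => exact ih (fun y hy => h y (by simp [hy]))

-- the scatter loops build exactly the counter of the flat target list pvBig
theorem pv_scatter_eq (n m : Int) (mine : List String) :
    pvScatter n m mine =
      (pvBig n m mine).foldl (fun d p => d.insert p (d.getD p 0 + 1)) PySem.Dict.empty := by
  unfold pvScatter pvBig pvCells pvBlock
  simp only [List.foldl_flatMap, List.foldl_map]
  apply PySem.List.foldl_congr_mem
  intro d i _
  apply PySem.List.foldl_congr_mem
  intro d' j _
  by_cases h : (pvCell mine i j == '*') = true
  · simp only [h, if_true]
    rw [List.foldl_flatMap]
    simp only [List.foldl_map]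
  · simp only [h, if_false, Bool.false_eq_true, List.foldl_nil]

theorem pv_scatter_getD (n m : Int) (mine : List String) (p : Int × Int) :
    (pvScatter n m mine).getD p 0 = ((pvBig n m mine).count p : Int) := by
  rw [pv_scatter_eq, PySem.Dict.getD_foldl_insert_add_one]
  simp

theorem pv_sum_ite (l : List (Int × Int)) (p : (Int × Int) → Bool) :
    (l.map (fun x => if p x then (1:Nat) else 0)).sum = l.countP p := by
  induction l with
  | nil => rfl
  | cons x t ih => by_cases h : p x <;> simp [h, ih, Nat.add_comm]

-- gather form of A's count
theorem pv_count_bombs_eq (mine : List String) (i j n m : Int) :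
    count_bombs mine i j n m =
      (pv_directions.countP (fun d =>
        pv_in_bounds (i + d.1) (j + d.2) n m && (pvCell mine (i + d.1) (j + d.2) == '*')) : Int) := by
  unfold count_bombs
  rw [PySem.List.foldl_if_add_one]
  simp

theorem pv_count_bombs_nonneg (mine : List String) (i j n m : Int) :
    0 ≤ count_bombs mine i j n m := by
  rw [pv_count_bombs_eq]
  exact Int.natCast_nonneg _

-- the crux: for a non-bomb in-range cell the scattered counter equals A's gathered count
theorem pv_count_eq (n m : Int) (mine : List String) (i j : Int)
    (hi : 0 ≤ i ∧ i < n) (hj : 0 ≤ j ∧ j < m)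
    (hnb : (pvCell mine i j == '*') = false) :
    (pvScatter n m mine).getD (i, j) 0 = count_bombs mine i j n m := by
  rw [pv_scatter_getD, pv_count_bombs_eq]
  congr 1
  have hL : (pvBig n m mine).count (i, j) =
      (pvCells n m).countP (fun p => (pvCell mine p.1 p.2 == '*') && decide ((i, j) ∈ pvBlock n m p.1 p.2)) := by
    rw [pvBig, List.count_flatMap, ← pv_sum_ite]
    congr 1
    apply List.map_congr_left
    intro p hp
    by_cases hb : (pvCell mine p.1 p.2 == '*') = true
    · by_cases hm : (i, j) ∈ pvBlock n m p.1 p.2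
      · have hnd : (pvBlock n m p.1 p.2).Nodup := by
          unfold pvBlock
          exact pv_nodup_pairs _ _ (PySem.List.nodup_pyRange_one _ _) (PySem.List.nodup_pyRange_one _ _)
        simp [Function.comp, hb, hm, List.count_eq_one_of_mem hnd hm]
      · simp [Function.comp, hb, hm, List.count_eq_zero.mpr hm]
    · simp [Function.comp, hb]
  rw [hL]
  have hR : pv_directions.countP (fun d =>
        pv_in_bounds (i + d.1) (j + d.2) n m && (pvCell mine (i + d.1) (j + d.2) == '*'))
      = (pv_directions.map (fun d => (i + d.1, j + d.2))).countP
          (fun q => pv_in_bounds q.1 q.2 n m && (pvCell mine q.1 q.2 == '*')) := by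
    rw [List.countP_map]; rfl
  rw [hR, List.countP_eq_length_filter, List.countP_eq_length_filter]
  apply List.Perm.length_eq
  rw [List.perm_ext_iff_of_nodup]
  · intro q
    simp only [List.mem_filter, pvCells, pv_mem_pairs, PySem.List.mem_pyRange_one,
      List.mem_map, Bool.and_eq_true, decide_eq_true_eq, pv_in_bounds]
    constructor
    · rintro ⟨⟨⟨hq1, hq1'⟩, hq2, hq2'⟩, hb, hmem⟩
      rw [pvBlock, pv_mem_pairs] at hmem
      simp only [PySem.List.mem_pyRange_one] at hmem
      have hne : ¬ (q.1 = i ∧ q.2 = j) := by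
        rintro ⟨h1, h2⟩
        rw [h1, h2] at hb
        rw [hb] at hnb
        exact Bool.noConfusion hnb
      push Not at hne
      refine ⟨⟨(q.1 - i, q.2 - j), ?_, ?_⟩, ⟨⟨hq1, hq1'⟩, hq2, hq2'⟩, hb⟩
      · simp only [pv_directions, List.mem_cons, List.not_mem_nil, or_false, Prod.ext_iff]
        simp only [max_le_iff, lt_min_iff] at hmem
        omega
      · simp only [Prod.ext_iff]
        constructor <;> simp
    · rintro ⟨⟨d, hd, rfl⟩, hbnd, hb⟩
      simp only [pv_directions, List.mem_cons, List.not_mem_nil, or_false] at hd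
      refine ⟨⟨⟨?_, ?_⟩, ?_, ?_⟩, hb, ?_⟩
      · omega
      · omega
      · omega
      · omega
      · rw [pvBlock, pv_mem_pairs]
        simp only [PySem.List.mem_pyRange_one]
        rcases hd with h|h|h|h|h|h|h|h <;>
          (rw [h]; simp only [max_le_iff, lt_min_iff]; constructor <;> constructor <;> omega)
  · exact (pv_nodup_pairs _ _ (PySem.List.nodup_pyRange_one _ _) (PySem.List.nodup_pyRange_one _ _)).filter _
  · refine List.Nodup.filter _ (List.Nodup.map ?_ (by decide))
    intro a b hab
    simp only [Prod.ext_iff] at hab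
    obtain ⟨h1, h2⟩ := hab
    rw [Prod.ext_iff]
    constructor <;> omega

-- a digit cell is not a bomb cell
theorem pv_isdigit_ne_star (c : Char) (h : PySem.Chars.isdigit c = true) : (c == '*') = false := by
  cases hc : c == '*'
  · rfl
  · rw [beq_iff_eq] at hc
    rw [hc] at h
    exact Bool.noConfusion h

-- per-cell agreement of the two validation passes
theorem pv_cell_agree (n m : Int) (mine : List String) (i j : Int)
    (hi : 0 ≤ i ∧ i < n) (hj : 0 ≤ j ∧ j < m) :
    (if PySem.Chars.isdigit (pvCell mine i j) then
        (if pvIntC (pvCell mine i j) ≠ count_bombs mine i j n m then some "NO" else none)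
      else if pvCell mine i j == '.' then
        (if count_bombs mine i j n m > 0 then some "NO" else none)
      else none) =
    (if PySem.Chars.isdigit (pvCell mine i j) then
        (if (pvScatter n m mine).getD (i, j) 0 ≠ pvIntC (pvCell mine i j) then some "NO" else none)
      else if pvCell mine i j == '.' then
        (if (pvScatter n m mine).getD (i, j) 0 ≠ 0 then some "NO" else none)
      else none) := by
  by_cases hdig : PySem.Chars.isdigit (pvCell mine i j) = true
  · have hc := pv_count_eq n m mine i j hi hj (pv_isdigit_ne_star _ hdig)
    rw [hc]
    simp only [hdig, if_true]
    split_ifs with h1 h2 h2 <;> first | rfl | omega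
  · simp only [hdig]
    by_cases hdot : (pvCell mine i j == '.') = true
    · have hnb : (pvCell mine i j == '*') = false := by
        rw [beq_iff_eq] at hdot
        rw [hdot]
        rfl
      have hc := pv_count_eq n m mine i j hi hj hnb
      have hnn := pv_count_bombs_nonneg mine i j n m
      rw [hc]
      simp only [hdot, if_true, Bool.false_eq_true]
      split_ifs with h1 h2 h2 <;> first | rfl | omega
    · simp [hdot]

-- ===== VERDICT (by name: the statement is the Claim_ definition above) =====
theorem validate_minesweeper_field_spec : Claim_equal_validate_minesweeper_field := by
  intro n m mine _ _
  unfold Spec_validate_minesweeper_field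
  unfold validate_minesweeper_field validate_minesweeper_field_alt
  have h : (PySem.List.pyRange 0 n 1).findSome? (fun i =>
      (PySem.List.pyRange 0 m 1).findSome? (fun j =>
        if PySem.Chars.isdigit (pvCell mine i j) then
          (if pvIntC (pvCell mine i j) ≠ count_bombs mine i j n m then some "NO" else none)
        else if pvCell mine i j == '.' then
          (if count_bombs mine i j n m > 0 then some "NO" else none)
        else none)) =
    (PySem.List.pyRange 0 n 1).findSome? (fun i =>
      (PySem.List.pyRange 0 m 1).findSome? (fun j =>
        if PySem.Chars.isdigit (pvCell mine i j) then
          (if (pvScatter n m mine).getD (i, j) 0 ≠ pvIntC (pvCell mine i j) then some "NO" else none)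
        else if pvCell mine i j == '.' then
          (if (pvScatter n m mine).getD (i, j) 0 ≠ 0 then some "NO" else none)
        else none)) := by
    apply pv_findSome?_congr
    intro i hi
    apply pv_findSome?_congr
    intro j hj
    rw [PySem.List.mem_pyRange_one] at hi hj
    exact pv_cell_agree n m mine i j ⟨hi.1, hi.2⟩ ⟨hj.1, hj.2⟩
  rw [h]
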